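-- pv_equiv track=rewrite | github.com/hrssurt/lintcode | 1518  Watering Flowers.py | waterPlants
-- ===== SOURCE A (Python) =====
-- def waterPlants(plants, capacity1, capacity2):
--     if not plants: return 0
--     left, right = 0, len(plants) - 1
--     can1, can2 = 0, 0
--     refill_count = 0
--     while left < right:
--         if plants[left] > can1:
--             refill_count += 1
--             can1 = capacity1 - plants[left]
--         else:
--             can1 -= plants[left]
--
--         if plants[right] > can2:
--             refill_count += 1
--             can2 = capacity2 - plants[right]
--         else:
--             can2 -= plants[right]
--
--         left, right = left + 1, right - 1
--
--     if left == right: # meet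
--         if can1 + can2 < plants[left]:
--             refill_count += 1
--
--     return refill_count
-- ===== SOURCE B (Python) =====
-- def waterPlants(plants, capacity1, capacity2):
--     if not plants:
--         return 0
--     n = len(plants)
--     half = n // 2
--
--     def refills_and_level(cap, seq):
--         # prefix sums of seq
--         sums = []
--         t = 0
--         for p in seq:
--             t += p
--             sums.append(t)
--         # greedy breakpoints: a refill happens exactly when the cumulative
--         # amount watered since the last refill would exceed the can's limit
--         base, limit, cnt = 0, 0, 0
--         for p, s in zip(seq, sums):
--             if s - base > limit:
--                 cnt += 1
--                 base = s - p
--                 limit = cap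
--         return limit - t + base, cnt
--
--     lvl1, cnt1 = refills_and_level(capacity1, plants[:half])
--     lvl2, cnt2 = refills_and_level(capacity2, plants[n - half:][::-1])
--     total = cnt1 + cnt2
--     if n % 2 == 1 and lvl1 + lvl2 < plants[half]:
--         total += 1
--     return total
-- ===== Notes on version B (the rewrite author's own statement) =====
-- stated objective: alternative
-- what changed: B replaces A's interleaved two-pointer simulation of remaining water levels by prefix-sum greedy segmentation: for each half (left forward, right reversed) it precomputes cumulative sums and counts refills as greedy threshold crossings of those sums, recovering the final levels arithmetically for the middle check.
import Mathlib
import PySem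

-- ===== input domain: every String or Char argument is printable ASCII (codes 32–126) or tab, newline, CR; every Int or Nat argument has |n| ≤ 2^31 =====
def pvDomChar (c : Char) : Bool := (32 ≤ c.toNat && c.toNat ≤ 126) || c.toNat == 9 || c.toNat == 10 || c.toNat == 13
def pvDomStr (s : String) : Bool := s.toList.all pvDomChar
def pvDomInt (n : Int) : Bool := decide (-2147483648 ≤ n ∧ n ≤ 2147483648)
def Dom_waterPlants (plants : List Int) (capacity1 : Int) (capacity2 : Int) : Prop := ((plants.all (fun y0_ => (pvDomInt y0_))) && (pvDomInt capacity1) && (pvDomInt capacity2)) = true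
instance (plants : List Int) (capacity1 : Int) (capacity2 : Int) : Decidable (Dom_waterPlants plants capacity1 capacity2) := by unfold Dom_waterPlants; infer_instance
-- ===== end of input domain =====

-- B replaces A's interleaved two-pointer simulation of remaining water levels by
-- prefix-sum greedy segmentation per half (left forward, right reversed), counting
-- refills as threshold crossings of cumulative sums; objective: alternative
-- algorithmic formulation, same asymptotic cost. No mutation in either.

-- ===== PORT A =====
-- A's while-loop: two indices moving inward, shared refill counter.
def waterPlantsLoop (plants : List Int) (capacity1 : Int) (capacity2 : Int)
    (left right : Nat) (can1 can2 refill : Int) : Nat × Nat × Int × Int × Int :=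
  if left < right then
    let p := plants.getD left 0
    let refill1 := if p > can1 then refill + 1 else refill
    let can1' := if p > can1 then capacity1 - p else can1 - p
    let q := plants.getD right 0
    let refill2 := if q > can2 then refill1 + 1 else refill1
    let can2' := if q > can2 then capacity2 - q else can2 - q
    waterPlantsLoop plants capacity1 capacity2 (left + 1) (right - 1) can1' can2' refill2
  else (left, right, can1, can2, refill)
termination_by right - left
decreasing_by omega

def waterPlants (plants : List Int) (capacity1 : Int) (capacity2 : Int) : Int :=
  if plants = [] then 0
  else
    let r := waterPlantsLoop plants capacity1 capacity2 0 (plants.length - 1) 0 0 0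
    let left := r.1
    let right := r.2.1
    let can1 := r.2.2.1
    let can2 := r.2.2.2.1
    let refill := r.2.2.2.2
    if left = right then
      if can1 + can2 < plants.getD left 0 then refill + 1 else refill
    else refill

-- ===== PORT B =====
-- the python loop 'for p in seq: t += p; sums.append(t)': prefix sums and total
def pfxSums (seq : List Int) : List Int × Int :=
  seq.foldl (fun st p => (st.1 ++ [st.2 + p], st.2 + p)) ([], 0)

-- the python loop 'for p, s in zip(seq, sums)': greedy breakpoint scan
def waterScan (cap : Int) (pairs : List (Int × Int))
    (base limit cnt : Int) : Int × Int × Int :=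
  pairs.foldl (fun st ps =>
    if ps.2 - st.1 > st.2.1 then (ps.2 - ps.1, cap, st.2.2 + 1) else st)
    (base, limit, cnt)

def refillsAndLevel (cap : Int) (seq : List Int) : Int × Int :=
  let sp := pfxSums seq
  let r := waterScan cap (seq.zip sp.1) 0 0 0
  (r.2.1 - sp.2 + r.1, r.2.2)

def waterPlants_alt (plants : List Int) (capacity1 : Int) (capacity2 : Int) : Int :=
  if plants = [] then 0
  else
    let n := plants.length
    let half := n / 2
    let s1 := refillsAndLevel capacity1 (plants.take half)
    let s2 := refillsAndLevel capacity2 ((plants.drop (n - half)).reverse)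
    let total := s1.2 + s2.2
    if n % 2 = 1 ∧ s1.1 + s2.1 < plants.getD half 0 then total + 1 else total

-- ===== PRECONDITION & SPEC =====
def Spec_waterPlants (plants : List Int) (capacity1 : Int) (capacity2 : Int) (out : Int) : Prop := out = waterPlants_alt plants capacity1 capacity2
instance (plants : List Int) (capacity1 : Int) (capacity2 : Int) (out : Int) : Decidable (Spec_waterPlants plants capacity1 capacity2 out) := by unfold Spec_waterPlants; infer_instance

-- ===== CLAIM (what is proved, stated in full; the proofs are below) =====
def Claim_equal_waterPlants : Prop := ∀ (plants : List Int) (capacity1 : Int) (capacity2 : Int), Dom_waterPlants plants capacity1 capacity2 → Spec_waterPlants plants capacity1 capacity2 (waterPlants plants capacity1 capacity2)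

-- ===== LEMMAS AND PROOFS =====

-- proof-only reference simulation of one watering can (level, refills)
def simCan (cap : Int) (l : List Int) (can refill : Int) : Int × Int :=
  l.foldl (fun s p => if p > s.1 then (cap - p, s.2 + 1) else (s.1 - p, s.2)) (can, refill)

theorem simCan_cons (cap p : Int) (rest : List Int) (can refill : Int) :
    simCan cap (p :: rest) can refill
      = if p > can then simCan cap rest (cap - p) (refill + 1)
        else simCan cap rest (can - p) refill := by
  by_cases h : p > can <;> simp [simCan, List.foldl, h]

theorem simCan_refill (cap : Int) (l : List Int) (can refill : Int) :
    simCan cap l can refill = ((simCan cap l can 0).1, (simCan cap l can 0).2 + refill) := by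
  induction l generalizing can refill with
  | nil => simp [simCan]
  | cons p rest ih =>
    rw [simCan_cons, simCan_cons]
    by_cases h : p > can
    · rw [if_pos h, if_pos h, ih _ (refill + 1), ih _ (0 + 1)]
      exact Prod.ext rfl (by omega)
    · rw [if_neg h, if_neg h, ih _ refill]

theorem simCan_fst (cap : Int) (l : List Int) (can refill : Int) :
    (simCan cap l can refill).1 = (simCan cap l can 0).1 := by rw [simCan_refill]

theorem simCan_snd (cap : Int) (l : List Int) (can refill : Int) :
    (simCan cap l can refill).2 = (simCan cap l can 0).2 + refill := by rw [simCan_refill]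

-- prefix sums starting from a running total t
def sumsFrom (t : Int) : List Int → List Int
  | [] => []
  | p :: rest => (t + p) :: sumsFrom (t + p) rest

theorem pfxSums_foldl (seq : List Int) (acc : List Int) (t : Int) :
    seq.foldl (fun st p => (st.1 ++ [st.2 + p], st.2 + p)) (acc, t)
      = (acc ++ sumsFrom t seq, t + seq.sum) := by
  induction seq generalizing acc t with
  | nil => simp [sumsFrom]
  | cons p rest ih =>
    simp only [List.foldl, sumsFrom, ih, List.append_assoc, List.singleton_append,
      List.sum_cons]
    exact Prod.ext rfl (by omega)

theorem pfxSums_eq (seq : List Int) :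
    pfxSums seq = (sumsFrom 0 seq, seq.sum) := by
  unfold pfxSums
  rw [pfxSums_foldl]
  simp

-- the greedy threshold scan computes exactly the reference simulation
theorem waterScan_eq (cap : Int) (seq : List Int) (t base limit cnt : Int) :
    (let r := waterScan cap (seq.zip (sumsFrom t seq)) base limit cnt
     (r.2.1 - (t + seq.sum) + r.1, r.2.2))
      = simCan cap seq (limit - t + base) cnt := by
  induction seq generalizing t base limit cnt with
  | nil =>
    simp only [sumsFrom, List.zip_nil_right, waterScan, List.foldl, simCan,
      List.sum_nil]
    exact Prod.ext (by dsimp; omega) rfl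
  | cons p rest ih =>
    simp only [sumsFrom, List.zip_cons_cons, waterScan, List.foldl, List.sum_cons,
      simCan_cons]
    by_cases h : t + p - base > limit
    · rw [if_pos h, if_pos (by omega : p > limit - t + base)]
      have := ih (t + p) (t + p - p) cap (cnt + 1)
      simp only [waterScan] at this
      rw [show t + (p + rest.sum) = (t + p) + rest.sum by omega, this]
      congr 1
      omega
    · rw [if_neg h, if_neg (by omega : ¬ p > limit - t + base)]
      have := ih (t + p) base limit cnt
      simp only [waterScan] at this
      rw [show t + (p + rest.sum) = (t + p) + rest.sum by omega, this]
      congr 1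
      omega

theorem refillsAndLevel_eq (cap : Int) (seq : List Int) :
    refillsAndLevel cap seq = simCan cap seq 0 0 := by
  unfold refillsAndLevel
  rw [pfxSums_eq]
  have h := waterScan_eq cap seq 0 0 0 0
  simp only [sub_zero, add_zero, zero_add] at h ⊢
  exact h

-- the A loop, in terms of two independent simCan runs over index segments
theorem loop_eq (plants : List Int) (c1 c2 : Int) (left right : Nat) (can1 can2 refill : Int) :
    waterPlantsLoop plants c1 c2 left right can1 can2 refill =
      (left + (right + 1 - left) / 2, right - (right + 1 - left) / 2,
       (simCan c1 ((List.range ((right + 1 - left) / 2)).map (fun i => plants.getD (left + i) 0)) can1 refill).1,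
       (simCan c2 ((List.range ((right + 1 - left) / 2)).map (fun i => plants.getD (right - i) 0)) can2 0).1,
       (simCan c1 ((List.range ((right + 1 - left) / 2)).map (fun i => plants.getD (left + i) 0)) can1 refill).2 +
       (simCan c2 ((List.range ((right + 1 - left) / 2)).map (fun i => plants.getD (right - i) 0)) can2 0).2) := by
  generalize hg : right - left = g
  induction g using Nat.strong_induction_on generalizing left right can1 can2 refill with
  | _ g ih =>
  by_cases h : left < right
  · rw [waterPlantsLoop]
    simp only [if_pos h]
    have ht : (right + 1 - left) / 2 = (right - 1 + 1 - (left + 1)) / 2 + 1 := by omega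
    rw [ih (right - 1 - (left + 1)) (by omega) (left + 1) (right - 1) _ _ _ rfl]
    rw [ht, List.range_succ_eq_map]
    simp only [List.map_cons, List.map_map, Nat.add_zero, Nat.sub_zero]
    have e1 : ((fun i => plants.getD (left + i) 0) ∘ Nat.succ)
        = fun i => plants.getD (left + 1 + i) 0 := by
      funext i
      simp only [Function.comp, Nat.succ_eq_add_one]
      congr 1
      omega
    have e2 : ((fun i => plants.getD (right - i) 0) ∘ Nat.succ)
        = fun i => plants.getD (right - 1 - i) 0 := by
      funext i
      simp only [Function.comp, Nat.succ_eq_add_one]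
      congr 1
      omega
    rw [e1, e2]
    generalize List.map (fun i => plants.getD (left + 1 + i) 0)
        (List.range ((right - 1 + 1 - (left + 1)) / 2)) = A1
    generalize List.map (fun i => plants.getD (right - 1 - i) 0)
        (List.range ((right - 1 + 1 - (left + 1)) / 2)) = A2
    rw [simCan_cons, simCan_cons]
    split_ifs with h1 h2 h2 <;> simp only [Prod.mk.injEq]
    · exact ⟨by omega, by omega,
        by rw [simCan_fst c1 A1 (c1 - plants.getD left 0) (refill + 1 + 1),
               simCan_fst c1 A1 (c1 - plants.getD left 0) (refill + 1)],
        by conv_rhs => rw [simCan_fst],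
        by rw [simCan_snd c1 A1 (c1 - plants.getD left 0) (refill + 1 + 1),
               simCan_snd c1 A1 (c1 - plants.getD left 0) (refill + 1),
               simCan_snd c2 A2 (c2 - plants.getD right 0) (0 + 1)]; omega⟩
    · exact ⟨by omega, by omega, trivial⟩
    · exact ⟨by omega, by omega,
        by rw [simCan_fst c1 A1 (can1 - plants.getD left 0) (refill + 1),
               simCan_fst c1 A1 (can1 - plants.getD left 0) refill],
        by conv_rhs => rw [simCan_fst],
        by rw [simCan_snd c1 A1 (can1 - plants.getD left 0) (refill + 1),
               simCan_snd c1 A1 (can1 - plants.getD left 0) refill,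
               simCan_snd c2 A2 (c2 - plants.getD right 0) (0 + 1)]; omega⟩
    · exact ⟨by omega, by omega, trivial⟩
  · rw [waterPlantsLoop]
    have ht : (right + 1 - left) / 2 = 0 := by omega
    simp [h, ht, simCan, List.range_zero]

-- index-segment lists are exactly B's slices
theorem seg1_eq (plants : List Int) (t : Nat) (h : t ≤ plants.length) :
    (List.range t).map (fun i => plants.getD (0 + i) 0) = plants.take t := by
  apply List.ext_getElem
  · simp [Nat.min_eq_left h]
  · intro i h1 h2
    simp only [List.getElem_map, List.getElem_range, List.getElem_take, Nat.zero_add]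
    have hi : i < plants.length := by simp at h1; omega
    rw [List.getD_eq_getElem _ _ hi]

theorem seg2_eq (plants : List Int) (t : Nat) (h : t ≤ plants.length) :
    (List.range t).map (fun i => plants.getD (plants.length - 1 - i) 0)
      = (plants.drop (plants.length - t)).reverse := by
  apply List.ext_getElem
  · simp
    omega
  · intro i h1 h2
    simp only [List.getElem_map, List.getElem_range, List.getElem_reverse, List.getElem_drop]
    have hi : i < t := by simpa using h1
    rw [List.getD_eq_getElem _ _ (by omega : plants.length - 1 - i < plants.length)]
    congr 1
    simp
    omega

-- ===== VERDICT (by name: the statement is the Claim_ definition above) =====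
theorem waterPlants_spec : Claim_equal_waterPlants := by
  intro plants c1 c2 _
  unfold Spec_waterPlants waterPlants waterPlants_alt
  by_cases hnil : plants = []
  · simp [hnil]
  · simp only [if_neg hnil]
    have hn : 1 ≤ plants.length := by
      cases plants with
      | nil => exact absurd rfl hnil
      | cons a l => simp
    have ht : (plants.length - 1 + 1 - 0) / 2 = plants.length / 2 := by omega
    rw [loop_eq, ht, seg1_eq plants _ (Nat.div_le_self _ _),
        seg2_eq plants _ (Nat.div_le_self _ _)]
    dsimp only
    rw [refillsAndLevel_eq, refillsAndLevel_eq]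
    simp only [Nat.zero_add]
    split_ifs <;> omega
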